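-- pv_equiv track=rewrite | github.com/CraigVG/roman-letters-network | scripts/enrich_relationships.py | match_name_to_author
-- ===== SOURCE A (Python) =====
-- GROUP_AUTHOR_IDS = set()
--
-- def match_name_to_author(text, name_to_id, all_authors_by_id=None):
--     """Try to match a recipient text to a known author."""
--     text_clean = text.strip().rstrip(',.;:').strip()
--     text_lower = text_clean.lower()
--
--     # Direct match
--     if text_lower in name_to_id:
--         return name_to_id[text_lower]
--
--     # Check if any known name appears at the start, prefer longest match
--     for name, author_id in sorted(name_to_id.items(), key=lambda x: -len(x[0])):
--         if text_lower.startswith(name):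
--             return author_id
--
--     # Check if text contains a known name (>= 6 chars)
--     for name, author_id in sorted(name_to_id.items(), key=lambda x: -len(x[0])):
--         if len(name) >= 6 and name in text_lower:
--             if author_id not in GROUP_AUTHOR_IDS:
--                 return author_id
--
--     # Try matching first word from the text against author names
--     # This catches "Augustine, Bishop of Hippo" -> first word "augustine"
--     words = text_lower.split()
--     if words:
--         first_word = words[0].strip("(),")
--         if len(first_word) >= 6:
--             if first_word in name_to_id:
--                 return name_to_id[first_word]
--             # Even if first_word was ambiguous (excluded from name_to_id),
--             # try to find it as the first word of a real person's name
--             if all_authors_by_id: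
--                 candidates = []
--                 for aid, aname in all_authors_by_id.items():
--                     if aid in GROUP_AUTHOR_IDS:
--                         continue
--                     aname_lower = aname.lower()
--                     # Match "augustine" -> "Augustine of Hippo" (first word match)
--                     aname_first = aname_lower.split()[0].strip("(),")
--                     if aname_first == first_word:
--                         # Prefer authors whose name pattern is "Name of Place"
--                         if " of " in aname_lower:
--                             candidates.insert(0, aid)
--                         else:
--                             candidates.append(aid)
--                 if len(candidates) == 1:
--                     return candidates[0]
--                 elif candidates:
--                     # If there's one with "of" pattern, prefer it
--                     return candidates[0]
--
--     return None
-- ===== SOURCE B (Python) =====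
-- def match_name_to_author(text, name_to_id, all_authors_by_id=None):
--     """Match a recipient text to a known author: sort-free linear passes tracking the
--     longest matching name per rule instead of sorting the items for each scan."""
--     text_lower = text.strip().rstrip(',.;:').strip().lower()
--
--     # Direct match
--     if text_lower in name_to_id:
--         return name_to_id[text_lower]
--
--     # Linear pass (no sorting): longest name that is a prefix of the text.
--     best = None
--     for name, author_id in name_to_id.items():
--         if text_lower.startswith(name) and (best is None or len(name) > len(best[0])):
--             best = (name, author_id)
--     if best is not None:
--         return best[1]
--
--     # Linear pass: longest contained name (>= 6 chars).
--     best = None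
--     for name, author_id in name_to_id.items():
--         if len(name) >= 6 and name in text_lower and (best is None or len(name) > len(best[0])):
--             best = (name, author_id)
--     if best is not None:
--         return best[1]
--
--     # First word of the text against author names
--     words = text_lower.split()
--     if words:
--         first_word = words[0].strip("(),")
--         if len(first_word) >= 6:
--             if first_word in name_to_id:
--                 return name_to_id[first_word]
--             if all_authors_by_id:
--                 last_of = None       # latest '... of ...' style match
--                 first_plain = None   # earliest other match
--                 for aid, aname in all_authors_by_id.items():
--                     aname_lower = aname.lower()
--                     if aname_lower.split()[0].strip("(),") == first_word:
--                         if " of " in aname_lower: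
--                             last_of = aid
--                         elif first_plain is None:
--                             first_plain = aid
--                 if last_of is not None:
--                     return last_of
--                 if first_plain is not None:
--                     return first_plain
--     return None
-- ===== Notes on version B (the rewrite author's own statement) =====
-- stated objective: alternative
-- what changed: B drops A's sort-the-whole-dict-then-take-first-match passes in favour of sort-free linear passes that track the longest matching name, and replaces A's candidate-list building (insert(0)/append, then take the head) by two running slots (latest '... of ...' match, earliest other match).
import Mathlib
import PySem

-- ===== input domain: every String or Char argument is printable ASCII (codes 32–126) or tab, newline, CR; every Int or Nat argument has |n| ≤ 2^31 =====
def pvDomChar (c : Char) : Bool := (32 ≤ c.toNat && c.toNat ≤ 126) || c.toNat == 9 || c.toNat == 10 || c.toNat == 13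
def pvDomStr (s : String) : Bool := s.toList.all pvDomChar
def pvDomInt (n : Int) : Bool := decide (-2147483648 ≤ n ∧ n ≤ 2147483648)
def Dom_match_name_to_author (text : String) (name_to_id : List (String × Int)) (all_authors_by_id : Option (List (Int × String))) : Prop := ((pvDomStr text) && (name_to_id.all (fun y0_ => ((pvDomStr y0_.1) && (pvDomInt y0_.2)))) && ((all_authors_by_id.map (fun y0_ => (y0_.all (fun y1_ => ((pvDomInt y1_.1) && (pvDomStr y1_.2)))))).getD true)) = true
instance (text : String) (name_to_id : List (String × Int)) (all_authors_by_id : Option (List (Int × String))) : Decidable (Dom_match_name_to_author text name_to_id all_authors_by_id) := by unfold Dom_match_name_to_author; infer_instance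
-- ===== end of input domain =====

-- B replaces A's sort-then-take-first-match passes over the name dict by sort-free linear
-- passes tracking the longest matching name, and A's candidate-list pass by two running slots.


-- shared primitives (not in PySem): Python's str.rstrip(chars) — drop trailing characters
-- occurring in `chars`; exact on all strings
def pvRstripChars (s : String) (chars : String) : String :=
  String.ofList ((s.toList.reverse.dropWhile (fun c => chars.toList.contains c)).reverse)

-- dict membership + lookup on an insertion-ordered dict (first match)
def pvLookup (d : List (String × Int)) (k : String) : Option Int :=
  (d.find? (fun p => p.1 == k)).map (·.2)

-- ===== PORT A =====
-- GROUP_AUTHOR_IDS = set()  (module constant, empty)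
def pvGroupAuthorIds : List Int := []

-- loop body of A's candidate loop (insert(0)/append on the candidates list)
def pvCandStep (first_word : String) (acc : List Int) (p : Int × String) : List Int :=
  if pvGroupAuthorIds.contains p.1 then acc
  else
    let aname_lower := PySem.Str.lower p.2
    -- aname_lower.split()[0] raises IndexError on a whitespace-only name;
    -- Pre_ excludes that case, headD "" is the total stand-in
    let aname_first := PySem.Str.stripChars ((PySem.Str.split₀ aname_lower).headD "") "(),"
    if aname_first == first_word then
      if PySem.Str.isIn " of " aname_lower then p.1 :: acc
      else acc ++ [p.1]
    else acc

def match_name_to_author (text : String) (name_to_id : List (String × Int)) (all_authors_by_id : Option (List (Int × String))) : Option Int :=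
  let text_clean := PySem.Str.strip (pvRstripChars (PySem.Str.strip text) ",.;:")
  let text_lower := PySem.Str.lower text_clean
  -- Direct match
  match pvLookup name_to_id text_lower with
  | some v => some v
  | none =>
    -- startswith scan over the items sorted by -len(name)
    match (PySem.List.sorted name_to_id (fun x => -(PySem.Str.len x.1)) false).find?
        (fun p => PySem.Str.startswith text_lower p.1) with
    | some p => some p.2
    | none =>
      -- containment scan (>= 6 chars) over the items sorted by -len(name)
      match (PySem.List.sorted name_to_id (fun x => -(PySem.Str.len x.1)) false).find?
          (fun p => decide (6 ≤ PySem.Str.len p.1) && PySem.Str.isIn p.1 text_lower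
                    && !(pvGroupAuthorIds.contains p.2)) with
      | some p => some p.2
      | none =>
        let words := PySem.Str.split₀ text_lower
        match words with
        | [] => none
        | w :: _ =>
          let first_word := PySem.Str.stripChars w "(),"
          if 6 ≤ PySem.Str.len first_word then
            match pvLookup name_to_id first_word with
            | some v => some v
            | none =>
              match all_authors_by_id with
              | none => none
              | some authors =>
                if authors.isEmpty then none
                else
                  let candidates := authors.foldl (pvCandStep first_word) []
                  if candidates.length == 1 then candidates.head?
                  else if !candidates.isEmpty then candidates.head?
                  else none
          else none

-- ===== PORT B =====
-- loop body of B's single pass over the author dict: latest "… of …" match, earliest other match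
def pvSlotStep (first_word : String) (st : Option Int × Option Int) (p : Int × String) : Option Int × Option Int :=
  let aname_lower := PySem.Str.lower p.2
  if PySem.Str.stripChars ((PySem.Str.split₀ aname_lower).headD "") "()," == first_word then
    if PySem.Str.isIn " of " aname_lower then (some p.1, st.2)
    else (st.1, match st.2 with | none => some p.1 | some x => some x)
  else st

def match_name_to_author_alt (text : String) (name_to_id : List (String × Int)) (all_authors_by_id : Option (List (Int × String))) : Option Int :=
  let text_lower := PySem.Str.lower (PySem.Str.strip (pvRstripChars (PySem.Str.strip text) ",.;:"))
  match pvLookup name_to_id text_lower with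
  | some v => some v
  | none =>
    -- linear pass (no sorting): longest name that is a prefix of the text
    match name_to_id.foldl (fun acc p =>
        if PySem.Str.startswith text_lower p.1
           && (match acc with
               | none => true
               | some m => decide (PySem.Str.len m.1 < PySem.Str.len p.1))
        then some p else acc) none with
    | some p => some p.2
    | none =>
      -- linear pass: longest contained name (>= 6 chars)
      match name_to_id.foldl (fun acc p =>
          if decide (6 ≤ PySem.Str.len p.1) && PySem.Str.isIn p.1 text_lower
             && (match acc with
                 | none => true
                 | some m => decide (PySem.Str.len m.1 < PySem.Str.len p.1))
          then some p else acc) none with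
      | some p => some p.2
      | none =>
        match PySem.Str.split₀ text_lower with
        | [] => none
        | w :: _ =>
          let first_word := PySem.Str.stripChars w "(),"
          if 6 ≤ PySem.Str.len first_word then
            match pvLookup name_to_id first_word with
            | some v => some v
            | none =>
              match all_authors_by_id with
              | none => none
              | some authors =>
                if authors.isEmpty then none
                else
                  let r := authors.foldl (pvSlotStep first_word) (none, none)
                  r.1.or r.2
          else none

-- the cleaned lowered text and its stripped first word (used only to state Pre_)
def pvTextLower (text : String) : String :=
  PySem.Str.lower (PySem.Str.strip (pvRstripChars (PySem.Str.strip text) ",.;:"))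
def pvFirstWord (text : String) : String :=
  PySem.Str.stripChars ((PySem.Str.split₀ (pvTextLower text)).headD "") "(),"

-- ===== PRECONDITION & SPEC =====
-- Pre_ excludes exactly the inputs on which Python A raises IndexError: all_authors_by_id holds a
-- whitespace-only author name AND the author loop is actually reached (no earlier rule resolved the
-- text); Python B raises on exactly the same inputs.
def Pre_match_name_to_author (text : String) (name_to_id : List (String × Int)) (all_authors_by_id : Option (List (Int × String))) : Prop :=
  (∀ p ∈ all_authors_by_id.getD [], PySem.Str.split₀ (PySem.Str.lower p.2) ≠ []) ∨
  all_authors_by_id.getD [] = [] ∨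
  (∃ p ∈ name_to_id, p.1 = pvTextLower text) ∨
  (∃ p ∈ name_to_id, PySem.Str.startswith (pvTextLower text) p.1 = true) ∨
  (∃ p ∈ name_to_id, 6 ≤ PySem.Str.len p.1 ∧ PySem.Str.isIn p.1 (pvTextLower text) = true) ∨
  PySem.Str.split₀ (pvTextLower text) = [] ∨
  PySem.Str.len (pvFirstWord text) < 6 ∨
  (∃ p ∈ name_to_id, p.1 = pvFirstWord text)
instance (text : String) (name_to_id : List (String × Int)) (all_authors_by_id : Option (List (Int × String))) : Decidable (Pre_match_name_to_author text name_to_id all_authors_by_id) := by unfold Pre_match_name_to_author; infer_instance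

def pvWitness_match_name_to_author : String × (List (String × Int)) × (Option (List (Int × String))) :=
  ("augustine", [("jerome", 1)], some [(2, "Augustine of Hippo")])

def Spec_match_name_to_author (text : String) (name_to_id : List (String × Int)) (all_authors_by_id : Option (List (Int × String))) (out : Option Int) : Prop := out = match_name_to_author_alt text name_to_id all_authors_by_id
instance (text : String) (name_to_id : List (String × Int)) (all_authors_by_id : Option (List (Int × String))) (out : Option Int) : Decidable (Spec_match_name_to_author text name_to_id all_authors_by_id out) := by unfold Spec_match_name_to_author; infer_instance

-- ===== CLAIM (what is proved, stated in full; the proofs are below) =====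
def Claim_equal_match_name_to_author : Prop := ∀ (text : String) (name_to_id : List (String × Int)) (all_authors_by_id : Option (List (Int × String))), Dom_match_name_to_author text name_to_id all_authors_by_id → Pre_match_name_to_author text name_to_id all_authors_by_id → Spec_match_name_to_author text name_to_id all_authors_by_id (match_name_to_author text name_to_id all_authors_by_id)

-- ===== LEMMAS AND PROOFS =====

lemma pvInsertByCons {α : Type} (f : α → α → Bool) (x y : α) (ys : List α) :
    PySem.List.insertBy f x (y :: ys)
      = if f x y then x :: y :: ys else y :: PySem.List.insertBy f x ys := rfl

lemma pvFindInsert (q : String × Int → Bool) (x : String × Int) (l : List (String × Int))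
    (hl : l.Pairwise (fun a b => -(PySem.Str.len a.1) ≤ -(PySem.Str.len b.1))) :
    (PySem.List.insertBy (fun a b => decide (-(PySem.Str.len a.1) < -(PySem.Str.len b.1))) x l).find? q
      = if q x && (match l.find? q with
                   | none => true
                   | some m => decide (PySem.Str.len m.1 < PySem.Str.len x.1))
        then some x else l.find? q := by
  induction l with
  | nil =>
    cases hq : q x <;> simp [PySem.List.insertBy, List.find?, hq]
  | cons y ys ih =>
    rw [List.pairwise_cons] at hl
    rw [pvInsertByCons]
    by_cases hb : -(PySem.Str.len x.1) < -(PySem.Str.len y.1)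
    · rw [if_pos (decide_eq_true hb)]
      cases hf : List.find? q (y :: ys) with
      | none =>
        cases hq : q x with
        | false => rw [List.find?_cons_of_neg (by simp [hq]), hf]; simp
        | true => rw [List.find?_cons_of_pos hq]; simp
      | some m =>
        have hmem : m ∈ y :: ys := List.mem_of_find?_eq_some hf
        have hym : -(PySem.Str.len y.1) ≤ -(PySem.Str.len m.1) := by
          rcases List.mem_cons.mp hmem with h | h
          · subst h; omega
          · exact hl.1 m h
        have hcond : PySem.Str.len m.1 < PySem.Str.len x.1 := by omega
        cases hq : q x with
        | false => rw [List.find?_cons_of_neg (by simp [hq]), hf]; simp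
        | true =>
          have hc2 : m.1.length < x.1.length := by
            simp only [PySem.Str.len_eq, String.length_toList] at hcond
            exact_mod_cast hcond
          rw [List.find?_cons_of_pos hq]; simp [hc2]
    · rw [if_neg (by simpa using hb)]
      by_cases hqy : q y = true
      · rw [List.find?_cons_of_pos hqy, List.find?_cons_of_pos hqy]
        have hxy : ¬ (y.1.length < x.1.length) := by
          simp only [PySem.Str.len_eq, String.length_toList] at hb
          omega
        simp [hxy]
      · rw [List.find?_cons_of_neg (by simp [hqy]), List.find?_cons_of_neg (by simp [hqy])]
        exact ih hl.2

-- A's sort-then-first-match scan equals B's single "longest so far" fold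
lemma pvScan (q : String × Int → Bool) (xs : List (String × Int)) :
    (PySem.List.sorted xs (fun x => -(PySem.Str.len x.1)) false).find? q
      = xs.foldl (fun acc p =>
          if q p && (match acc with
                     | none => true
                     | some m => decide (PySem.Str.len m.1 < PySem.Str.len p.1))
          then some p else acc) none := by
  induction xs using List.reverseRecOn with
  | nil => simp [PySem.List.sorted_eq_foldl_insertBy]
  | append_singleton xs x ih =>
    have hs : PySem.List.sorted (xs ++ [x]) (fun x => -(PySem.Str.len x.1)) false
        = PySem.List.insertBy (fun a b => decide (-(PySem.Str.len a.1) < -(PySem.Str.len b.1))) x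
            (PySem.List.sorted xs (fun x => -(PySem.Str.len x.1)) false) := by
      rw [PySem.List.sorted_eq_foldl_insertBy, PySem.List.sorted_eq_foldl_insertBy, List.foldl_append]
      rfl
    rw [hs, List.foldl_append,
      pvFindInsert q x _ (PySem.List.sorted_pairwise xs (fun x => -(PySem.Str.len x.1))), ih]
    rfl

lemma pvGetLastCons {α : Type} (a : α) (l : List α) :
    (a :: l).getLast? = l.getLast?.or (some a) := by
  cases l with
  | nil => rfl
  | cons b t =>
    rw [List.getLast?_cons_cons]
    cases h : (b :: t).getLast? with
    | none => exact absurd (List.getLast?_eq_none_iff.mp h) (by simp)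
    | some v => rfl

-- A's candidate list is (reversed "of" matches) ++ init ++ (other matches)
lemma pvCandShape {α β : Type} (m o : α → Bool) (π : α → β) :
    ∀ (l : List α) (init : List β),
      l.foldl (fun acc p => if m p then (if o p then π p :: acc else acc ++ [π p]) else acc) init
        = ((l.filter (fun p => m p && o p)).map π).reverse ++ init
            ++ (l.filter (fun p => m p && !o p)).map π := by
  intro l
  induction l with
  | nil => intro init; simp
  | cons x t ih =>
    intro init
    cases hm : m x <;> cases ho : o x <;>
      simp [hm, ho, ih, List.append_assoc]

-- B's two running slots are the last "of" match and the first other match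
lemma pvSlotFold {α β : Type} (m o : α → Bool) (π : α → β) :
    ∀ (l : List α) (s1 s2 : Option β),
      l.foldl (fun st p =>
          if m p then
            (if o p then (some (π p), st.2)
             else (st.1, st.2.or (some (π p))))
          else st) (s1, s2)
        = ((((l.filter (fun p => m p && o p)).map π).getLast?).or s1,
           s2.or (((l.filter (fun p => m p && !o p)).map π).head?)) := by
  intro l
  induction l with
  | nil => intro s1 s2; simp
  | cons x t ih =>
    intro s1 s2
    cases hm : m x <;> cases ho : o x <;>
      simp only [List.foldl_cons, List.filter_cons, hm, ho, Bool.and_self, Bool.and_true,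
        Bool.and_false, Bool.not_true, Bool.not_false, Bool.false_eq_true, if_false,
        eq_self_iff_true, if_true, List.map_cons, List.head?_cons, ih, pvGetLastCons,
        Option.or_assoc, Option.some_or]

-- A's candidate fold in closed form (the group filter is empty)
lemma pvCandEq (fw : String) (l : List (Int × String)) (init : List Int) :
    l.foldl (pvCandStep fw) init
      = ((l.filter (fun p =>
            (PySem.Str.stripChars ((PySem.Str.split₀ (PySem.Str.lower p.2)).headD "") "()," == fw)
            && PySem.Str.isIn " of " (PySem.Str.lower p.2))).map (fun p => (p.1 : Int))).reverse ++ init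
        ++ (l.filter (fun p =>
            (PySem.Str.stripChars ((PySem.Str.split₀ (PySem.Str.lower p.2)).headD "") "()," == fw)
            && !PySem.Str.isIn " of " (PySem.Str.lower p.2))).map (fun p => (p.1 : Int)) := by
  have hfun : pvCandStep fw = (fun acc p =>
      if (PySem.Str.stripChars ((PySem.Str.split₀ (PySem.Str.lower p.2)).headD "") "()," == fw) then
        (if PySem.Str.isIn " of " (PySem.Str.lower p.2) then p.1 :: acc else acc ++ [p.1])
      else acc) := by
    funext acc p
    simp [pvCandStep, pvGroupAuthorIds]
  rw [hfun]
  have H := pvCandShape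
    (fun p => (PySem.Str.stripChars ((PySem.Str.split₀ (PySem.Str.lower p.2)).headD "") "()," == fw))
    (fun p => PySem.Str.isIn " of " (PySem.Str.lower p.2)) (fun p => (p.1 : Int)) l init
  exact H

-- B's slot fold in the same terms
lemma pvSlotEq (fw : String) (l : List (Int × String)) :
    l.foldl (pvSlotStep fw) (none, none)
      = ((((l.filter (fun p =>
            (PySem.Str.stripChars ((PySem.Str.split₀ (PySem.Str.lower p.2)).headD "") "()," == fw)
            && PySem.Str.isIn " of " (PySem.Str.lower p.2))).map (fun p => (p.1 : Int))).getLast?).or none,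
         Option.or none (((l.filter (fun p =>
            (PySem.Str.stripChars ((PySem.Str.split₀ (PySem.Str.lower p.2)).headD "") "()," == fw)
            && !PySem.Str.isIn " of " (PySem.Str.lower p.2))).map (fun p => (p.1 : Int))).head?)) := by
  have hfun : pvSlotStep fw = (fun st p =>
      if (PySem.Str.stripChars ((PySem.Str.split₀ (PySem.Str.lower p.2)).headD "") "()," == fw) then
        (if PySem.Str.isIn " of " (PySem.Str.lower p.2) then (some p.1, st.2)
         else (st.1, st.2.or (some p.1)))
      else st) := by
    funext st p
    obtain ⟨s1, s2⟩ := st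
    cases s2 <;> simp [pvSlotStep]
  rw [hfun]
  have H := pvSlotFold
    (fun p => (PySem.Str.stripChars ((PySem.Str.split₀ (PySem.Str.lower p.2)).headD "") "()," == fw))
    (fun p => PySem.Str.isIn " of " (PySem.Str.lower p.2)) (fun p => (p.1 : Int)) l none none
  exact H

-- A's three-way return on the candidate list is just head?, and head? of
-- (reversed ofs ++ plains) is getLast?/head? of the parts
lemma pvHeadGlue {β : Type} (ofs plains : List β) :
    (if (ofs.reverse ++ plains).length == 1 then (ofs.reverse ++ plains).head?
     else if !(ofs.reverse ++ plains).isEmpty then (ofs.reverse ++ plains).head?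
     else none)
      = (ofs.getLast?.or none).or (Option.or none plains.head?) := by
  have h1 : (if (ofs.reverse ++ plains).length == 1 then (ofs.reverse ++ plains).head?
     else if !(ofs.reverse ++ plains).isEmpty then (ofs.reverse ++ plains).head?
     else none) = (ofs.reverse ++ plains).head? := by
    cases h : ofs.reverse ++ plains <;> simp
  rw [h1]
  cases ho : ofs.getLast? with
  | none =>
    have : ofs = [] := List.getLast?_eq_none_iff.mp ho
    subst this
    simp
  | some v =>
    have hrev : ofs.reverse.head? = some v := by rw [List.head?_reverse]; exact ho
    have h2 : (ofs.reverse ++ plains).head? = some v := by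
      cases hr : ofs.reverse with
      | nil => rw [hr] at hrev; simp at hrev
      | cons a t =>
        rw [hr] at hrev
        simpa using hrev
    rw [h2]
    simp

-- the step-5 tails of the two ports agree
lemma pvTailEq (fw : String) (authors : List (Int × String)) :
    (if (authors.foldl (pvCandStep fw) []).length == 1 then (authors.foldl (pvCandStep fw) []).head?
     else if !(authors.foldl (pvCandStep fw) []).isEmpty then (authors.foldl (pvCandStep fw) []).head?
     else none)
      = (authors.foldl (pvSlotStep fw) (none, none)).1.or (authors.foldl (pvSlotStep fw) (none, none)).2 := by
  rw [pvCandEq, pvSlotEq]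
  simp only [List.append_nil]
  exact pvHeadGlue _ _

-- ===== VERDICT (by name: the statement is the Claim_ definition above) =====
set_option maxHeartbeats 1000000 in
theorem match_name_to_author_spec : Claim_equal_match_name_to_author := by
  intro text name_to_id all_authors_by_id _hdom _hpre
  unfold Spec_match_name_to_author
  unfold match_name_to_author match_name_to_author_alt
  simp only [pvGroupAuthorIds, List.contains_nil, Bool.not_false, Bool.and_true]
  rw [pvScan, pvScan]
  simp only [pvTailEq]
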